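-- pv_equiv track=rewrite | github.com/UrbanGISer/Computational-Methods-and-GIS-Applications-in-Social-Science | Main-Book/CMGIS-V3-Toolbox/ArcPy-Tools/Scripts/DartmouthCommBySpAdjMtrxPro.py | __renumber
-- ===== SOURCE A (Python) =====
-- def __renumber(partition_dict, com2node_dict):
--     count = 1 # new community id after renumber starts from 1
--     re_part = partition_dict.copy()
--     new_values = dict([]) # a dict that stores the relationship between old and new community id, see below
--     com2node_tempdict = dict([]) # a temporal dict of com2node
--
--     for key in partition_dict.keys():
--         value = partition_dict[key]
--         new_value = new_values.get(value, -1)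
--         if new_value == -1:
--             new_values[value] = count # new_values is a dict that stores {526: 1, 486: 2...} where 526 is the
--             # original community name (i.e., value) and 1 is the community name after renumbering (i.e., count)
--             com2node_tempdict[count] = com2node_dict[value] # get ids that a community contains
--             new_value = count   # pass value to the outside of the loop
--             count += 1
--         re_part[key] = new_value
--
--     return re_part, com2node_tempdict, new_values
-- ===== SOURCE B (Python) =====
-- def __renumber(partition_dict, com2node_dict):
--     # Build the old->new index table first, then derive the three outputs in separate passes.
--     ordered = list(dict.fromkeys(partition_dict.values()))
--     new_values = {old: i for i, old in enumerate(ordered, start=1)}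
--     com2node_tempdict = {i: com2node_dict[old] for old, i in new_values.items()}
--     re_part = {k: new_values[v] for k, v in partition_dict.items()}
--     return re_part, com2node_tempdict, new_values
-- ===== Notes on version B (the rewrite author's own statement) =====
-- stated objective: simpler
-- what changed: Replaces the single fused loop with mutable count/new_value state by an index-table-first decomposition: one dedup pass over the values builds the old->new numbering, and the three result dicts are each produced by an independent comprehension over that table.
import Mathlib
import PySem

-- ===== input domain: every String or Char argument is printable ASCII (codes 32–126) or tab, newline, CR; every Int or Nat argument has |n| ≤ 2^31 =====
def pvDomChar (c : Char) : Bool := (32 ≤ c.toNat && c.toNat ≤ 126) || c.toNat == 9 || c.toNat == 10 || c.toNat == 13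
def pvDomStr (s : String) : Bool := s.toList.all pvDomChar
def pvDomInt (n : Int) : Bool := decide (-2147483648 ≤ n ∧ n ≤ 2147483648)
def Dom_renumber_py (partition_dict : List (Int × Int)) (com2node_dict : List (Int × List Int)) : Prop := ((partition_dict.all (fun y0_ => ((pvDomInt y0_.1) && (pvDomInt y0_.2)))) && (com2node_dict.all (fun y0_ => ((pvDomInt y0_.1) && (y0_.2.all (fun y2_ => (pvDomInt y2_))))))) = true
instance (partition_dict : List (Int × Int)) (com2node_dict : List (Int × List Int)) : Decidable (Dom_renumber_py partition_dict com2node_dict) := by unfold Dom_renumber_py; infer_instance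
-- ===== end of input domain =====

-- B replaces A's fused renumbering loop (mutable count/new_value state) by an index-table-first
-- decomposition: dedup the values once, then derive each of the three dicts by its own pass (objective: simpler).

-- ===== PORT A =====
-- one iteration of A's `for key in partition_dict.keys()` loop; state = (re_part, com2node_tempdict, new_values, count)
def renumberStep (pdD : PySem.Dict Int Int) (cdD : PySem.Dict Int (List Int))
    (st : PySem.Dict Int Int × PySem.Dict Int (List Int) × PySem.Dict Int Int × Int) (key : Int) :
    PySem.Dict Int Int × PySem.Dict Int (List Int) × PySem.Dict Int Int × Int :=
  let re_part := st.1
  let com2node_tempdict := st.2.1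
  let new_values := st.2.2.1
  let count := st.2.2.2
  let value := pdD.getD key 0
  let new_value := new_values.getD value (-1)
  if new_value == -1 then
    (re_part.insert key count, com2node_tempdict.insert count (cdD.getD value []),
     new_values.insert value count, count + 1)
  else
    (re_part.insert key new_value, com2node_tempdict, new_values, count)

def renumber_py (partition_dict : List (Int × Int)) (com2node_dict : List (Int × List Int)) : (List (Int × Int)) × (List (Int × List Int)) × (List (Int × Int)) :=
  let pdD : PySem.Dict Int Int := PySem.Dict.mk partition_dict
  let cdD : PySem.Dict Int (List Int) := PySem.Dict.mk com2node_dict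
  let st := pdD.keys.foldl (renumberStep pdD cdD) (pdD, PySem.Dict.empty, PySem.Dict.empty, 1)
  (st.1.items, st.2.1.items, st.2.2.1.items)

-- ===== PORT B =====
def renumber_py_alt (partition_dict : List (Int × Int)) (com2node_dict : List (Int × List Int)) : (List (Int × Int)) × (List (Int × List Int)) × (List (Int × Int)) :=
  let ordered := PySem.List.dedup (partition_dict.map (·.2))              -- dict.fromkeys(partition_dict.values())
  let new_values := (PySem.List.enumerate ordered 1).map (fun p => (p.2, p.1))  -- {old: i for i, old in enumerate(ordered, 1)}
  let nvD : PySem.Dict Int Int := PySem.Dict.mk new_values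
  let cdD : PySem.Dict Int (List Int) := PySem.Dict.mk com2node_dict
  let com2node_tempdict := new_values.map (fun p => (p.2, cdD.getD p.1 []))     -- {i: com2node_dict[old] for old, i in …}
  let re_part := partition_dict.map (fun kv => (kv.1, nvD.getD kv.2 0))         -- {k: new_values[v] for k, v in …}
  (re_part, com2node_tempdict, new_values)

-- ===== PRECONDITION & SPEC =====
-- Pre_ excludes (a) association lists with duplicate keys, where the list does not represent a Python
-- dict (Python collapses duplicates and the assoc list keeps both), and (b) inputs some of whose partition
-- values are not keys of com2node_dict, on which A raises KeyError (and B raises KeyError too).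
def Pre_renumber_py (partition_dict : List (Int × Int)) (com2node_dict : List (Int × List Int)) : Prop :=
  (partition_dict.map (·.1)).Nodup ∧ (com2node_dict.map (·.1)).Nodup ∧
  ∀ kv ∈ partition_dict, kv.2 ∈ com2node_dict.map (·.1)
instance (partition_dict : List (Int × Int)) (com2node_dict : List (Int × List Int)) : Decidable (Pre_renumber_py partition_dict com2node_dict) := by unfold Pre_renumber_py; infer_instance
def pvWitness_renumber_py : (List (Int × Int)) × (List (Int × List Int)) := ([(1, 5), (2, 5), (3, 7)], [(5, [1, 2]), (7, [3])])
def Spec_renumber_py (partition_dict : List (Int × Int)) (com2node_dict : List (Int × List Int)) (out : (List (Int × Int)) × (List (Int × List Int)) × (List (Int × Int))) : Prop := out = renumber_py_alt partition_dict com2node_dict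
instance (partition_dict : List (Int × Int)) (com2node_dict : List (Int × List Int)) (out : (List (Int × Int)) × (List (Int × List Int)) × (List (Int × Int))) : Decidable (Spec_renumber_py partition_dict com2node_dict out) := by unfold Spec_renumber_py; infer_instance

-- ===== CLAIM (what is proved, stated in full; the proofs are below) =====
def Claim_equal_renumber_py : Prop := ∀ (partition_dict : List (Int × Int)) (com2node_dict : List (Int × List Int)), Dom_renumber_py partition_dict com2node_dict → Pre_renumber_py partition_dict com2node_dict → Spec_renumber_py partition_dict com2node_dict (renumber_py partition_dict com2node_dict)

-- ===== LEMMAS AND PROOFS =====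
def mkNv (olds : List Int) (s : Int) : PySem.Dict Int Int :=
  PySem.Dict.mk ((PySem.List.enumerate olds s).map (fun p => (p.2, p.1)))
def mkTd (cdD : PySem.Dict Int (List Int)) (olds : List Int) : PySem.Dict Int (List Int) :=
  PySem.Dict.mk ((PySem.List.enumerate olds 1).map (fun p => (p.1, cdD.getD p.2 [])))

lemma get?_mkNv (olds : List Int) (s v : Int) :
    (mkNv olds s).get? v = if v ∈ olds then some (s + (List.idxOf v olds : Int)) else none := by
  induction olds generalizing s with
  | nil =>
    show (PySem.Dict.mk ((PySem.List.enumerate [] s).map _)).get? v = _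
    simp [PySem.List.enumerate, PySem.Dict.get?]
  | cons a t ih =>
    show (PySem.Dict.mk ((PySem.List.enumerate (a :: t) s).map _)).get? v = _
    rw [PySem.List.enumerate_cons]
    simp only [List.map_cons, PySem.Dict.get?_mk_cons]
    by_cases hva : a = v
    · subst hva
      simp
    · rw [if_neg (by simpa using hva)]
      rw [show ((PySem.List.enumerate t (s+1)).map (fun p => ((p.2 : Int), (p.1 : Int)))) = (mkNv t (s+1)).items from rfl]
      rw [ih (s+1)]
      by_cases hvt : v ∈ t
      · simp only [hvt, if_true, List.mem_cons, or_true, List.idxOf_cons,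
          show (a == v) = false by simpa using hva, cond_false]
        congr 1
        push_cast
        ring
      · simp [hvt, Ne.symm hva]

lemma keys_mkNv (olds : List Int) (s : Int) : (mkNv olds s).keys = olds := by
  show (PySem.Dict.mk _).keys = olds
  rw [PySem.Dict.keys_mk, List.map_map]
  exact PySem.List.map_snd_enumerate olds s

lemma keys_mkTd (cdD : PySem.Dict Int (List Int)) (olds : List Int) :
    (mkTd cdD olds).keys = PySem.List.pyRange 1 (1 + olds.length) 1 := by
  show (PySem.Dict.mk _).keys = _
  rw [PySem.Dict.keys_mk, List.map_map]
  exact PySem.List.map_fst_enumerate olds 1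

lemma mkNv_snoc (olds : List Int) (v : Int) (h : v ∉ olds) :
    (mkNv olds 1).insert v ((olds.length : Int) + 1) = mkNv (olds ++ [v]) 1 := by
  apply PySem.Dict.ext
  rw [PySem.Dict.items_insert_of_not_contains]
  · show _ = (PySem.List.enumerate (olds ++ [v]) 1).map _
    rw [PySem.List.enumerate_append, List.map_append]
    simp [mkNv, PySem.List.enumerate, add_comm]
  · rw [PySem.Dict.contains_eq_decide_mem_keys, keys_mkNv]
    simpa using h

lemma mkTd_snoc (cdD : PySem.Dict Int (List Int)) (olds : List Int) (v : Int) :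
    (mkTd cdD olds).insert ((olds.length : Int) + 1) (cdD.getD v [])
      = mkTd cdD (olds ++ [v]) := by
  apply PySem.Dict.ext
  rw [PySem.Dict.items_insert_of_not_contains]
  · show _ = (PySem.List.enumerate (olds ++ [v]) 1).map _
    rw [PySem.List.enumerate_append, List.map_append]
    simp [mkTd, PySem.List.enumerate, add_comm]
  · rw [PySem.Dict.contains_eq_decide_mem_keys, keys_mkTd]
    simp only [decide_eq_false_iff_not, PySem.List.mem_pyRange_one]
    omega

lemma idxOf_update_of_mem (olds l : List Int) (v : Int) (h : v ∈ olds) :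
    List.idxOf v (PySem.Set.update olds l) = List.idxOf v olds := by
  rw [PySem.Set.update_eq_append_filter]
  exact List.idxOf_append_of_mem h

lemma loopA (pdD : PySem.Dict Int Int) (cdD : PySem.Dict Int (List Int)) :
    ∀ (ks olds : List Int) (re : PySem.Dict Int Int),
      ks.Nodup → olds.Nodup → (∀ k ∈ ks, re.contains k = true) →
      ks.foldl (renumberStep pdD cdD) (re, mkTd cdD olds, mkNv olds 1, (olds.length : Int) + 1)
      = (PySem.Dict.mk (re.items.map (fun p => if p.1 ∈ ks then (p.1, 1 + (List.idxOf (pdD.getD p.1 0) (PySem.Set.update olds (ks.map (fun k => pdD.getD k 0))) : Int)) else p)),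
         mkTd cdD (PySem.Set.update olds (ks.map (fun k => pdD.getD k 0))),
         mkNv (PySem.Set.update olds (ks.map (fun k => pdD.getD k 0))) 1,
         ((PySem.Set.update olds (ks.map (fun k => pdD.getD k 0))).length : Int) + 1) := by
  intro ks
  induction ks with
  | nil =>
    intro olds re _ _ _
    simp [PySem.Set.update]
  | cons k rest ih =>
    intro olds re hnd hold hcont
    obtain ⟨hk_rest, hnd_rest⟩ := List.nodup_cons.mp hnd
    set v := pdD.getD k 0 with hv
    rw [List.foldl_cons]
    have hstep : renumberStep pdD cdD (re, mkTd cdD olds, mkNv olds 1, (olds.length : Int) + 1) k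
        = if v ∈ olds
          then (re.insert k (1 + (List.idxOf v olds : Int)), mkTd cdD olds, mkNv olds 1, (olds.length : Int) + 1)
          else (re.insert k ((olds.length : Int) + 1), mkTd cdD (olds ++ [v]), mkNv (olds ++ [v]) 1, ((olds ++ [v]).length : Int) + 1) := by
      by_cases hvo : v ∈ olds
      · have hg : (mkNv olds 1).getD v (-1) = 1 + (List.idxOf v olds : Int) := by
          rw [PySem.Dict.getD_eq_get?_getD, get?_mkNv, if_pos hvo]; rfl
        have hne : ((1 + (List.idxOf v olds : Int)) == -1) = false := by
          rw [beq_eq_false_iff_ne]; intro hE; omega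
        simp only [renumberStep, ← hv, hg, hne, if_pos hvo, Bool.false_eq_true, if_false]
      · have hg : (mkNv olds 1).getD v (-1) = -1 := by
          rw [PySem.Dict.getD_eq_get?_getD, get?_mkNv, if_neg hvo]; rfl
        simp only [renumberStep, ← hv, hg, if_neg hvo, BEq.rfl, if_true]
        rw [mkNv_snoc olds v hvo, mkTd_snoc]
        simp only [List.length_append, List.length_cons, List.length_nil]
        rw [Prod.ext_iff, Prod.ext_iff, Prod.ext_iff]
        refine ⟨rfl, rfl, rfl, ?_⟩
        push_cast
        ring
    rw [hstep]
    by_cases hvo : v ∈ olds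
    · rw [if_pos hvo]
      rw [ih olds (re.insert k (1 + (List.idxOf v olds : Int))) hnd_rest hold
        (by intro k' hk'; rw [PySem.Dict.contains_insert]
            simp [hcont k' (List.mem_cons_of_mem _ hk')])]
      simp only [List.map_cons, PySem.Set.update_cons, PySem.Set.add_of_mem hvo, ← hv]
      congr 1
      rw [PySem.Dict.items_insert_of_contains _ _ (hcont k (List.mem_cons_self)), List.map_map]
      apply PySem.Dict.ext
      apply List.map_congr_left
      intro p hp
      by_cases hpk : p.1 = k
      · have h1 : (p.1 == k) = true := by simpa using hpk
        simp only [Function.comp_apply, h1, if_true]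
        rw [if_neg (by simpa using hk_rest)]
        rw [if_pos (by simp [hpk] : p.1 ∈ k :: rest)]
        rw [hpk, ← hv, idxOf_update_of_mem _ _ _ hvo]
      · have hb : (p.1 == k) = false := by simpa using hpk
        simp only [Function.comp_apply, hb, Bool.false_eq_true, if_false]
        by_cases hpr : p.1 ∈ rest
        · rw [if_pos hpr, if_pos (by simp [hpr] : p.1 ∈ k :: rest)]
        · rw [if_neg hpr, if_neg (by simp [hpk, hpr] : ¬ p.1 ∈ k :: rest)]
    · rw [if_neg hvo]
      have hnd2 : (olds ++ [v]).Nodup := by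
        simp [List.nodup_append, hold]
        exact fun a ha h => hvo (h ▸ ha)
      rw [ih (olds ++ [v]) (re.insert k ((olds.length : Int) + 1)) hnd_rest hnd2
        (by intro k' hk'; rw [PySem.Dict.contains_insert]
            simp [hcont k' (List.mem_cons_of_mem _ hk')])]
      simp only [List.map_cons, PySem.Set.update_cons, PySem.Set.add_of_not_mem hvo, ← hv]
      congr 1
      rw [PySem.Dict.items_insert_of_contains _ _ (hcont k (List.mem_cons_self)), List.map_map]
      apply PySem.Dict.ext
      apply List.map_congr_left
      intro p hp
      by_cases hpk : p.1 = k
      · have h1 : (p.1 == k) = true := by simpa using hpk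
        simp only [Function.comp_apply, h1, if_true]
        rw [if_neg (by simpa using hk_rest)]
        rw [if_pos (by simp [hpk] : p.1 ∈ k :: rest)]
        rw [hpk, ← hv, idxOf_update_of_mem _ _ _ (by simp : v ∈ olds ++ [v]),
          List.idxOf_append, if_neg hvo]
        simp only [Prod.mk.injEq, true_and]
        simp
        omega
      · have hb : (p.1 == k) = false := by simpa using hpk
        simp only [Function.comp_apply, hb, Bool.false_eq_true, if_false]
        by_cases hpr : p.1 ∈ rest
        · rw [if_pos hpr, if_pos (by simp [hpr] : p.1 ∈ k :: rest)]
        · rw [if_neg hpr, if_neg (by simp [hpk, hpr] : ¬ p.1 ∈ k :: rest)]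

-- ===== VERDICT (by name: the statement is the Claim_ definition above) =====
theorem renumber_py_spec : Claim_equal_renumber_py := by
  intro pd cd _hdom hpre
  obtain ⟨hk, _hc, _hval⟩ := hpre
  unfold Spec_renumber_py
  have hknd : (PySem.Dict.mk pd).keys.Nodup := by rw [PySem.Dict.keys_mk]; exact hk
  have hcont : ∀ k ∈ pd.map (·.1), (PySem.Dict.mk pd).contains k = true := by
    intro k hkm
    rw [PySem.Dict.contains_eq_decide_mem_keys, PySem.Dict.keys_mk]
    simpa using hkm
  have hO : PySem.Set.update [] ((pd.map (·.1)).map (fun k => (PySem.Dict.mk pd).getD k 0))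
      = PySem.List.dedup (pd.map (·.2)) := by
    rw [PySem.Set.update_nil_left, List.map_map, PySem.List.dedup_eq_ofList]
    congr 1
    apply List.map_congr_left
    intro p hp
    exact PySem.Dict.getD_of_mem_items (d := PySem.Dict.mk pd) hp hknd 0
  have h := loopA (PySem.Dict.mk pd) (PySem.Dict.mk cd) (pd.map (·.1)) [] (PySem.Dict.mk pd)
      hk List.nodup_nil hcont
  rw [show mkTd (PySem.Dict.mk cd) [] = PySem.Dict.empty from rfl,
      show mkNv ([] : List Int) 1 = PySem.Dict.empty from rfl,
      show ((List.length ([] : List Int) : Int) + 1) = 1 from by norm_num, hO] at h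
  simp only [renumber_py, renumber_py_alt, PySem.Dict.keys_mk]
  rw [show (List.map (fun x => x.1) pd) = pd.map (·.1) from rfl, h]
  rw [Prod.ext_iff]
  constructor
  · show List.map _ pd = List.map _ pd
    apply List.map_congr_left
    intro p hp
    rw [if_pos (List.mem_map.mpr ⟨p, hp, rfl⟩)]
    rw [PySem.Dict.getD_of_mem_items (d := PySem.Dict.mk pd) hp hknd 0]
    have hmem : p.2 ∈ PySem.List.dedup (pd.map (·.2)) :=
      (PySem.List.mem_dedup _ _).mpr (List.mem_map.mpr ⟨p, hp, rfl⟩)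
    rw [show (PySem.Dict.mk ((PySem.List.enumerate (PySem.List.dedup (pd.map (·.2))) 1).map (fun p => (p.2, p.1)))) = mkNv (PySem.List.dedup (pd.map (·.2))) 1 from rfl]
    rw [PySem.Dict.getD_eq_get?_getD, get?_mkNv, if_pos hmem]
    rfl
  rw [Prod.ext_iff]
  constructor
  · show _ = List.map _ (List.map _ _)
    rw [List.map_map]
    rfl
  · rfl
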